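-- pv_equiv track=rewrite | github.com/RadarFinanciero/radarfinancieroec | app.py | _resumen
-- ===== SOURCE A (Python) =====
-- def _resumen(inds):
--     buenos   = [i for i in inds if i['estado'] == 'bueno']
--     alertas  = [i for i in inds if i['estado'] == 'alerta']
--     criticos = [i for i in inds if i['estado'] == 'critico']
--     return {
--         'buenos':   [i['nombre'] for i in buenos],
--         'alertas':  [i['nombre'] for i in alertas],
--         'criticos': [i['nombre'] for i in criticos],
--     }
-- ===== SOURCE B (Python) =====
-- def _resumen(inds):
--     res = {'buenos': [], 'alertas': [], 'criticos': []}
--     bucket = {'bueno': 'buenos', 'alerta': 'alertas', 'critico': 'criticos'}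
--     for i in inds:
--         k = bucket.get(i['estado'])
--         if k is not None:
--             res[k].append(i['nombre'])
--     return res
-- ===== Notes on version B (the rewrite author's own statement) =====
-- stated objective: alternative
-- what changed: One dispatch pass with an estado->bucket mapping and per-bucket appends replaces three filtering scans plus three name-extraction passes.
import Mathlib
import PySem

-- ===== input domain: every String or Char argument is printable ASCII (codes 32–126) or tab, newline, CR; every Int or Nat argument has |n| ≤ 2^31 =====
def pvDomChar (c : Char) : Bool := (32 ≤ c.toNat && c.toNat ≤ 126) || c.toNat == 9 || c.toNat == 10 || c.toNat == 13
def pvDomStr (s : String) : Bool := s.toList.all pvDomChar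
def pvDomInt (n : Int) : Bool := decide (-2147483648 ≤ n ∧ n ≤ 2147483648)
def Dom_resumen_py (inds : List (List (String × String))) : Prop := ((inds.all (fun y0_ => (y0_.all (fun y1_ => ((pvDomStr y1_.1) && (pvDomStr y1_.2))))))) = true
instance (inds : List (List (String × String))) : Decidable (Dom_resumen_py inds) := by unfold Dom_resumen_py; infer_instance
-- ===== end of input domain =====

-- B replaces A's three filtering scans plus three name-extraction passes by one dispatch pass
-- appending each name to its bucket; same return value (an 'alternative' decomposition, no speed claim).

-- dict lookup (first match in the association list); i['k'] raises KeyError when absent — Pre_ excludes that.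
def pvGetKey (i : List (String × String)) (k : String) : Option String := i.lookup k

-- i['nombre']; under Pre_ the key is present, so the default is never the value used.
def pvNom (i : List (String × String)) : String := (pvGetKey i "nombre").getD ""

-- ===== PORT A =====
def resumen_py (inds : List (List (String × String))) : List (String × List String) :=
  let buenos   := inds.filter (fun i => pvGetKey i "estado" == some "bueno")
  let alertas  := inds.filter (fun i => pvGetKey i "estado" == some "alerta")
  let criticos := inds.filter (fun i => pvGetKey i "estado" == some "critico")
  [("buenos",   buenos.map pvNom),
   ("alertas",  alertas.map pvNom),
   ("criticos", criticos.map pvNom)]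

-- ===== PORT B =====
-- bucket.get(i['estado']) inlined as a three-way test dispatching one append
def pvStep (acc : List String × List String × List String) (i : List (String × String)) :
    List String × List String × List String :=
  let e := pvGetKey i "estado"
  if e == some "bueno" then (acc.1 ++ [pvNom i], acc.2.1, acc.2.2)
  else if e == some "alerta" then (acc.1, acc.2.1 ++ [pvNom i], acc.2.2)
  else if e == some "critico" then (acc.1, acc.2.1, acc.2.2 ++ [pvNom i])
  else acc

def resumen_py_alt (inds : List (List (String × String))) : List (String × List String) :=
  let r := inds.foldl pvStep ([], [], [])
  [("buenos", r.1), ("alertas", r.2.1), ("criticos", r.2.2)]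

-- ===== PRECONDITION & SPEC =====
-- Pre_ excludes exactly the inputs where the Python raises KeyError: a dict without 'estado',
-- or a dict whose estado is one of the three buckets but which lacks 'nombre'.
def Pre_resumen_py (inds : List (List (String × String))) : Prop :=
  ∀ i ∈ inds, (pvGetKey i "estado").isSome = true ∧
    ((pvGetKey i "estado" = some "bueno" ∨ pvGetKey i "estado" = some "alerta" ∨
      pvGetKey i "estado" = some "critico") → (pvGetKey i "nombre").isSome = true)
instance (inds : List (List (String × String))) : Decidable (Pre_resumen_py inds) := by
  unfold Pre_resumen_py; infer_instance

def pvWitness_resumen_py : (List (List (String × String))) :=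
  [[("estado", "bueno"), ("nombre", "x")], [("estado", "otro")]]

def Spec_resumen_py (inds : List (List (String × String))) (out : List (String × List String)) : Prop := out = resumen_py_alt inds
instance (inds : List (List (String × String))) (out : List (String × List String)) : Decidable (Spec_resumen_py inds out) := by unfold Spec_resumen_py; infer_instance

-- ===== CLAIM (what is proved, stated in full; the proofs are below) =====
def Claim_equal_resumen_py : Prop := ∀ (inds : List (List (String × String))), Dom_resumen_py inds → Pre_resumen_py inds → Spec_resumen_py inds (resumen_py inds)

-- ===== LEMMAS AND PROOFS =====
def pvNames (e : String) (inds : List (List (String × String))) : List String :=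
  (inds.filter (fun i => pvGetKey i "estado" == some e)).map pvNom

lemma pvLoop (inds : List (List (String × String))) :
    ∀ b a c, inds.foldl pvStep (b, a, c) =
      (b ++ pvNames "bueno" inds, a ++ pvNames "alerta" inds, c ++ pvNames "critico" inds) := by
  induction inds with
  | nil => simp [pvNames]
  | cons i t ih =>
    intro b a c
    by_cases h1 : pvGetKey i "estado" == some "bueno"
    · have he : pvGetKey i "estado" = some "bueno" := by simpa using h1
      simp [pvStep, pvNames, he, List.foldl_cons, ih]
    · by_cases h2 : pvGetKey i "estado" == some "alerta"
      · have he : pvGetKey i "estado" = some "alerta" := by simpa using h2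
        simp [pvStep, pvNames, he, List.foldl_cons, ih]
      · by_cases h3 : pvGetKey i "estado" == some "critico"
        · have he : pvGetKey i "estado" = some "critico" := by simpa using h3
          simp [pvStep, pvNames, he, List.foldl_cons, ih]
        · simp [pvStep, pvNames, h1, h2, h3, List.foldl_cons, ih]

-- ===== VERDICT (by name: the statement is the Claim_ definition above) =====
theorem resumen_py_spec : Claim_equal_resumen_py := by
  intro inds _ _
  unfold Spec_resumen_py resumen_py resumen_py_alt
  simp [pvLoop inds [] [] [], pvNames]
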